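-- pv_equiv track=rewrite | github.com/graemeCorrin/advent_of_code | 2017/Graeme/python/advent/day/day_6.py | steps_to_infinite_loop
-- ===== SOURCE A (Python) =====
-- def steps_to_infinite_loop(array: list) -> int:
--     """
--     Redistribute the largest element in the list evenly across the list, starting at the element after the largest
--     element.  Continue until a configuration of the list is seen twice.  Return the number of steps.  This will be
--     the number of steps before an infinite loop is detected.
--
--     :param array: Input array of integers
--     :return: Steps till an infinite loop is detected
--     """
--     tuples = set()
--     steps = 0
--
--     while True:
--
--         # Check if current configuration already exists, return if it does, add it if it doesn't
--         tup = tuple(array)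
--         if tup in tuples:
--             return steps
--         else:
--             tuples.add(tup)
--
--         steps += 1
--
--         # Get the value and index of the maximum value in the list
--         max_i, max_value = max(enumerate(array), key=lambda e: e[1])
--
--         # Reset the value of the maximum element
--         array[max_i] = 0
--
--         # Redistribute the maximum value across the list, starting at the next element
--         for i in range(1, max_value + 1):
--             update_i = (i + max_i) % len(array)
--             array[update_i] += 1
-- ===== SOURCE B (Python) =====
-- def steps_to_infinite_loop(array: list) -> int:
--     """Count redistribution steps until a configuration repeats.
--
--     Instead of handing out the maximum one unit at a time, distribute all
--     full rounds at once with divmod and only loop for the remainder.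
--     Like the original, leaves `array` holding the first repeated
--     configuration on return.
--     """
--     def step(config):
--         n = len(config)
--         m = max(config)
--         mi = config.index(m)
--         q, r = divmod(max(m, 0), n)
--         nxt = [x + q for x in config]
--         nxt[mi] = q
--         for k in range(r):
--             nxt[(mi + 1 + k) % n] += 1
--         return tuple(nxt)
--
--     seen = set()
--     config = tuple(array)
--     while config not in seen:
--         seen.add(config)
--         config = step(config)
--     array[:] = config
--     return len(seen)
-- ===== Notes on version B (the rewrite author's own statement) =====
-- stated objective: alternative
-- what changed: B replaces the unit-at-a-time redistribution loop by a divmod closed form that adds the full rounds to every cell at once and only loops for the remainder (fewer than n iterations), and tracks progress with a set of pure tuples returning len(seen) instead of in-place mutation with a step counter; B also leaves `array` at the first repeated configuration like A.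
import Mathlib
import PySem

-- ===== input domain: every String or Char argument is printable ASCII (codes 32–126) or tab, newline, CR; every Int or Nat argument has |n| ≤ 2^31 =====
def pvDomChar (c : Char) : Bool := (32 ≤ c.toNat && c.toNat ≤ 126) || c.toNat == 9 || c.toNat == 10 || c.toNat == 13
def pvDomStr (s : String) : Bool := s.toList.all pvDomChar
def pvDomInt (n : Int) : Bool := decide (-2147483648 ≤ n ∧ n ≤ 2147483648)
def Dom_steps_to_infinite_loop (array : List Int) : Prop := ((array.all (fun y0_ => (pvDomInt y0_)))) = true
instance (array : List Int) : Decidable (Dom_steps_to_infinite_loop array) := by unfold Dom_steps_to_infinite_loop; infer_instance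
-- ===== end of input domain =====

-- B distributes the maximum with a divmod closed form (the full rounds are added to every cell at
-- once; only the remainder, fewer than n units, is handed out by a loop) and tracks the seen
-- configurations as a set of pure tuples, returning its size — instead of A's unit-at-a-time
-- redistribution with in-place mutation and a separate step counter.  Equivalence is about the
-- RETURN value; the Python B performs the same final in-place update of `array` as A does.
-- Both while-loops are ported with a large fuel parameter (a totality guard only: each iteration
-- consumes one unit of fuel and the agreement proof is fuel-parametric).

-- ===== PORT A =====
-- literal port of A's while-loop; the `none` branch of max? is where Python raises ValueError
-- (empty list), excluded by Pre_; every index reaching List.set/pyGetD is (i + max_i) % len,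
-- which lies in [0, len), so `.toNat` and the getD default are exact there.
def steps_to_infinite_loop_go (fuel : Nat) (tuples : PySem.Set (List Int)) (steps : Int)
    (array : List Int) : Int :=
  match fuel with
  | 0 => steps
  | fuel + 1 =>
    if PySem.Set.contains tuples array then steps
    else
      let tuples := PySem.Set.add tuples array
      let steps := steps + 1
      match PySem.List.max? (PySem.List.enumerate array) (fun e => e.2) with
      | none => steps
      | some (max_i, max_value) =>
        let array := array.set max_i.toNat 0
        let array := (PySem.List.pyRange 1 (max_value + 1) 1).foldl
          (fun arr i =>
            let update_i := PySem.Int.mod (i + max_i) ((arr.length : Int))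
            arr.set update_i.toNat (PySem.List.pyGetD arr update_i 0 + 1)) array
        steps_to_infinite_loop_go fuel tuples steps array

def steps_to_infinite_loop (array : List Int) : Int :=
  steps_to_infinite_loop_go 4611686018427387904 PySem.Set.empty 0 array

-- ===== PORT B =====
-- port of Source B's helper `step`: divmod closed form plus a short remainder loop
def pvStep (config : List Int) : List Int :=
  let n : Int := (config.length : Int)
  match PySem.List.max? config (fun x => x) with
  | none => config          -- Python raises ValueError on an empty sequence (outside Pre_)
  | some m =>
    match PySem.List.index? config m with
    | none => config        -- unreachable: the maximum is a member of the list
    | some mi =>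
      let q := PySem.Int.floordiv (max m 0) n
      let r := PySem.Int.mod (max m 0) n
      let nxt := config.map (fun x => x + q)
      let nxt := nxt.set mi q
      (PySem.List.pyRange 0 r 1).foldl
        (fun nxt k =>
          let u := PySem.Int.mod ((mi : Int) + 1 + k) n
          nxt.set u.toNat (PySem.List.pyGetD nxt u 0 + 1)) nxt

def steps_to_infinite_loop_alt_go (fuel : Nat) (seen : PySem.Set (List Int))
    (config : List Int) : Int :=
  match fuel with
  | 0 => PySem.Set.len seen
  | fuel + 1 =>
    if PySem.Set.contains seen config then PySem.Set.len seen
    else steps_to_infinite_loop_alt_go fuel (PySem.Set.add seen config) (pvStep config)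

def steps_to_infinite_loop_alt (array : List Int) : Int :=
  steps_to_infinite_loop_alt_go 4611686018427387904 PySem.Set.empty array

-- ===== PRECONDITION & SPEC =====
-- Pre_ excludes only the empty list, on which Python A raises ValueError (max of an empty sequence).
def Pre_steps_to_infinite_loop (array : List Int) : Prop := array ≠ []
instance (array : List Int) : Decidable (Pre_steps_to_infinite_loop array) := by
  unfold Pre_steps_to_infinite_loop; infer_instance

def pvWitness_steps_to_infinite_loop : List Int := [0, 2, 7, 0]

def Spec_steps_to_infinite_loop (array : List Int) (out : Int) : Prop := out = steps_to_infinite_loop_alt array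
instance (array : List Int) (out : Int) : Decidable (Spec_steps_to_infinite_loop array out) := by unfold Spec_steps_to_infinite_loop; infer_instance

-- ===== CLAIM (what is proved, stated in full; the proofs are below) =====
def Claim_equal_steps_to_infinite_loop : Prop := ∀ (array : List Int), Dom_steps_to_infinite_loop array → Pre_steps_to_infinite_loop array → Spec_steps_to_infinite_loop array (steps_to_infinite_loop array)

-- ===== LEMMAS AND PROOFS =====

-- `l[j] += 1` at a Nat index
def pvBump (l : List Int) (j : Nat) : List Int := l.set j (l.getD j 0 + 1)

theorem pvBump_length (l : List Int) (j : Nat) : (pvBump l j).length = l.length := by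
  simp [pvBump]

theorem pvBump_fold_length (js : List Nat) (l : List Int) :
    (js.foldl pvBump l).length = l.length := by
  induction js generalizing l with
  | nil => rfl
  | cons j t ih => simp [List.foldl_cons, ih, pvBump]

theorem pvBump_fold_getD (js : List Nat) (l : List Int) (j : Nat) (hj : j < l.length) :
    (js.foldl pvBump l).getD j 0 = l.getD j 0 + (js.count j : Int) := by
  induction js generalizing l with
  | nil => simp
  | cons j' t ih =>
    rw [List.foldl_cons, ih _ (by simp [pvBump_length]; omega)]
    by_cases h : j = j'
    · subst h
      simp [pvBump, List.getD_eq_getElem?_getD, List.getElem?_set_self (by omega)]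
      omega
    · simp [pvBump, List.getD_eq_getElem?_getD, List.getElem?_set_ne (by omega : j' ≠ j),
        List.count_cons]
      omega

-- the single-round hit count: among k < n, exactly one k has (a + k) % n = j (for j < n)
theorem pvCount_one_round (n a j : Nat) (hn : 0 < n) (hj : j < n) :
    (List.range n).countP (fun k => (a + k) % n == j) = 1 := by
  have hfun : (fun k => (a + k) % n == j) = (fun k => decide ((a + k) % n = j)) := by
    funext k; by_cases h : (a + k) % n = j <;> simp [h]
  have hbridge : (List.range n).countP (fun k => (a + k) % n == j)
      = ((Finset.range n).filter (fun k => (a + k) % n = j)).card := by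
    rw [hfun]
    simp [Finset.filter, Finset.range, Multiset.range, List.countP_eq_length_filter]
  set x := j + n - a % n with hx
  set k0 := x % n with hk0
  have hk0lt : k0 < n := Nat.mod_lt _ hn
  have hd := Nat.div_add_mod a n
  have hle : a % n < n := Nat.mod_lt _ hn
  have e1 : (a + k0) % n = (a + x) % n := Nat.ModEq.add_left a (Nat.mod_modEq x n)
  have e2 : a + x = j + n * (a / n + 1) := by
    have : n * (a / n + 1) = n * (a / n) + n := by ring
    omega
  have hmem : (a + k0) % n = j := by
    rw [e1, e2, Nat.add_mul_mod_self_left, Nat.mod_eq_of_lt hj]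
  have hfil : (Finset.range n).filter (fun k => (a + k) % n = j) = {k0} := by
    apply Finset.eq_singleton_iff_unique_mem.mpr
    refine ⟨by simp [Finset.mem_filter, hk0lt, hmem], ?_⟩
    intro k hk
    simp only [Finset.mem_filter, Finset.mem_range] at hk
    obtain ⟨hklt, hkeq⟩ := hk
    have h2 : k % n = k0 % n :=
      Nat.ModEq.add_left_cancel' a (by rw [hkeq, hmem] : (a + k) % n = (a + k0) % n)
    rwa [Nat.mod_eq_of_lt hklt, Nat.mod_eq_of_lt hk0lt] at h2
  rw [hbridge, hfil, Finset.card_singleton]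

-- n-periodic predicates: the count over a range splits into blocks
theorem pvCount_range_add (p : Nat → Bool) (n m : Nat) (hp : ∀ k, p (k + n) = p k) :
    (List.range (n + m)).countP p = (List.range n).countP p + (List.range m).countP p := by
  rw [List.range_add, List.countP_append]
  congr 1
  rw [List.countP_map]
  exact List.countP_congr (fun k _ => by simp only [Function.comp]; rw [Nat.add_comm n k, hp])

theorem pvCount_range_mul_add (n a j q r : Nat) (hn : 0 < n) (hj : j < n) :
    (List.range (q * n + r)).countP (fun k => (a + k) % n == j)
      = q + (List.range r).countP (fun k => (a + k) % n == j) := by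
  induction q with
  | zero => simp
  | succ q ih =>
    have h : (q + 1) * n + r = n + (q * n + r) := by ring
    rw [h, pvCount_range_add _ _ _ (fun k => by
      simp only [← Nat.add_assoc, Nat.add_mod_right]),
      pvCount_one_round n a j hn hj, ih]
    omega

-- characterization of A's max-of-enumerate fold: it returns the FIRST index of the maximum
theorem pvMaxEnum_aux (xs : List Int) : ∀ (s : Int) (p : Int × Int),
    ∃ q, (PySem.List.enumerate xs s).foldl
        (fun acc x => match acc with
          | none => some x
          | some m => if m.2 < x.2 then some x else some m) (some p) = some q ∧
      (q = p ∨ ∃ k : Nat, k < xs.length ∧ q = (s + (k : Int), xs.getD k 0) ∧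
        p.2 < xs.getD k 0 ∧ ∀ j : Nat, j < k → xs.getD j 0 < xs.getD k 0) := by
  induction xs with
  | nil => intro s p; exact ⟨p, by simp [PySem.List.enumerate], Or.inl rfl⟩
  | cons x t ih =>
    intro s p
    rw [PySem.List.enumerate_cons, List.foldl_cons]
    by_cases hx : p.2 < x
    · obtain ⟨q, hq, hcase⟩ := ih (s + 1) (s, x)
      refine ⟨q, by simpa [hx] using hq, Or.inr ?_⟩
      rcases hcase with rfl | ⟨k, hk, hq1, hlt, hall⟩
      · exact ⟨0, by simp, by simp, by simpa using hx, by omega⟩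
      · refine ⟨k + 1, by simpa using hk, ?_, ?_, ?_⟩
        · rw [hq1, Prod.ext_iff]
          exact ⟨by push_cast; ring, by simp⟩
        · exact lt_trans hx (by simpa using hlt)
        · intro j hj
          cases j with
          | zero => simpa using (by simpa using hlt)
          | succ j => simpa using hall j (by omega)
    · obtain ⟨q, hq, hcase⟩ := ih (s + 1) p
      refine ⟨q, by simpa [hx] using hq, ?_⟩
      rcases hcase with rfl | ⟨k, hk, hq1, hlt, hall⟩
      · exact Or.inl rfl
      · refine Or.inr ⟨k + 1, by simpa using hk, ?_, by simpa using hlt, ?_⟩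
        · rw [hq1, Prod.ext_iff]
          exact ⟨by push_cast; ring, by simp⟩
        · intro j hj
          cases j with
          | zero =>
            simp only [List.getD_cons_zero, List.getD_cons_succ]
            exact lt_of_le_of_lt (not_lt.mp hx) hlt
          | succ j => simpa using hall j (by omega)

theorem pvMaxEnum_char (arr : List Int) (h : arr ≠ []) :
    ∃ k : Nat, k < arr.length ∧
      PySem.List.max? (PySem.List.enumerate arr) (fun e => e.2) = some ((k : Int), arr.getD k 0) ∧
      ∀ j : Nat, j < k → arr.getD j 0 < arr.getD k 0 := by
  obtain ⟨a, t, rfl⟩ : ∃ a t, arr = a :: t := by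
    cases arr with
    | nil => simp at h
    | cons a t => exact ⟨a, t, rfl⟩
  obtain ⟨q, hq, hcase⟩ := pvMaxEnum_aux t 1 (0, a)
  have hmax : PySem.List.max? (PySem.List.enumerate (a :: t)) (fun e : Int × Int => e.2) = some q := by
    rw [PySem.List.max?]
    rw [PySem.List.enumerate_cons, List.foldl_cons]
    convert hq using 2
    funext acc x
    cases acc <;> rfl
  rcases hcase with rfl | ⟨k, hk, hq1, hlt, hall⟩
  · exact ⟨0, by simp, by simpa using hmax, by omega⟩
  · refine ⟨k + 1, by simpa using hk, ?_, ?_⟩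
    · rw [hmax, hq1]
      congr 1
      rw [Prod.ext_iff]
      exact ⟨by push_cast; ring, by simp⟩
    · intro j hj
      cases j with
      | zero => simpa using hlt
      | succ j => simpa using hall j (by omega)

-- Python list.index on the first index of the maximum
theorem pvIdxOf (v : Int) (l : List Int) : ∀ k : Nat, k < l.length → l.getD k 0 = v →
    (∀ j, j < k → l.getD j 0 ≠ v) → List.idxOf? v l = some k := by
  induction l with
  | nil => intro k hk; simp at hk
  | cons a t ih =>
    intro k hk hv hfirst
    cases k with
    | zero =>
      simp at hv
      simp [List.idxOf?_cons, hv]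
    | succ k =>
      have ha : ¬ (a == v) = true := by
        have := hfirst 0 (Nat.succ_pos k)
        simpa using this
      rw [List.idxOf?_cons, if_neg ha, ih k (by simpa using hk) (by simpa using hv)
        (fun j hj => by simpa using hfirst (j+1) (by omega))]
      rfl

-- Python max(xs) (no key) returns the maximum value
theorem pvMaxId (arr : List Int) (mv : Int) (hmem : mv ∈ arr) (hub : ∀ y ∈ arr, y ≤ mv) :
    PySem.List.max? arr (fun x => x) = some mv := by
  obtain ⟨a, t, rfl⟩ : ∃ a t, arr = a :: t := by
    cases arr with
    | nil => simp at hmem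
    | cons a t => exact ⟨a, t, rfl⟩
  rw [PySem.List.max?_id_cons]
  have h1 := PySem.List.le_foldl_max t a
  have h2 := PySem.List.foldl_max_mem t a
  congr 1
  apply le_antisymm
  · rcases h2 with h2 | h2
    · rw [h2]; exact hub a (by simp)
    · exact hub _ (by simp [h2])
  · rcases List.mem_cons.mp hmem with h | h
    · subst h; exact h1.1
    · exact h1.2 mv h

-- A's redistribution loop, rewritten as a fold of pvBump over its (Nat) index list
theorem pvLoopA_eq_bump (is : List Int) (off : Int) : ∀ (l : List Int), 0 < l.length →
    is.foldl (fun arr i =>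
        let u := PySem.Int.mod (i + off) ((arr.length : Int))
        arr.set u.toNat (PySem.List.pyGetD arr u 0 + 1)) l
    = (is.map (fun i => (PySem.Int.mod (i + off) ((l.length : Int))).toNat)).foldl pvBump l := by
  induction is with
  | nil => intro l _; rfl
  | cons i t ih =>
    intro l hl
    rw [List.foldl_cons, List.map_cons, List.foldl_cons]
    have hu : 0 ≤ PySem.Int.mod (i + off) ((l.length : Int)) :=
      PySem.Int.mod_nonneg _ (by exact_mod_cast hl)
    have hbody : (let u := PySem.Int.mod (i + off) ((l.length : Int))
        l.set u.toNat (PySem.List.pyGetD l u 0 + 1))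
        = pvBump l (PySem.Int.mod (i + off) ((l.length : Int))).toNat := by
      simp only [pvBump, PySem.List.pyGetD_of_nonneg _ _ hu]
    rw [hbody, ih _ (by rw [pvBump_length]; exact hl), pvBump_length]

-- B's remainder loop, same rewriting (its index function does not read the accumulator)
theorem pvLoopB_eq_bump (is : List Int) (f : Int → Int) (hf : ∀ i, 0 ≤ f i) : ∀ (l : List Int),
    is.foldl (fun nxt i => nxt.set (f i).toNat (PySem.List.pyGetD nxt (f i) 0 + 1)) l
    = (is.map (fun i => (f i).toNat)).foldl pvBump l := by
  induction is with
  | nil => intro l; rfl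
  | cons i t ih =>
    intro l
    rw [List.foldl_cons, List.map_cons, List.foldl_cons, ih]
    congr 1
    simp only [pvBump, PySem.List.pyGetD_of_nonneg _ _ (hf i)]

-- the core step lemma: one iteration of A's redistribution equals pvStep
theorem pvStep_eq (arr : List Int) (h : arr ≠ []) :
    ∀ mi mv, PySem.List.max? (PySem.List.enumerate arr) (fun e => e.2) = some (mi, mv) →
    ((PySem.List.pyRange 1 (mv + 1) 1).foldl
      (fun a i =>
        let u := PySem.Int.mod (i + mi) ((a.length : Int))
        a.set u.toNat (PySem.List.pyGetD a u 0 + 1)) (arr.set mi.toNat 0)) = pvStep arr := by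
  intro mi mv hmax
  obtain ⟨k, hk, hmax', hfirst⟩ := pvMaxEnum_char arr h
  rw [hmax, Option.some.injEq, Prod.mk.injEq] at hmax'
  obtain ⟨hmi, hmv⟩ := hmax'
  subst hmi
  subst hmv
  have hn0 : 0 < arr.length := List.length_pos_iff.mpr h
  have hub : ∀ y ∈ arr, y ≤ arr.getD k 0 := by
    intro y hy
    obtain ⟨j, hj, rfl⟩ := List.mem_iff_getElem.mp hy
    have hpair : ((0 : Int) + (j : Int), arr[j]) ∈ PySem.List.enumerate arr :=
      (PySem.List.mem_enumerate_iff _ _ _).mpr ⟨j, hj, rfl⟩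
    have hle := PySem.List.max?_isMax hmax _ hpair
    simpa using hle
  have hmem : arr.getD k 0 ∈ arr := by
    rw [List.getD_eq_getElem _ _ hk]
    exact List.getElem_mem hk
  have hidx : PySem.List.index? arr (arr.getD k 0) = some k := by
    rw [PySem.List.index?]
    exact pvIdxOf _ _ k hk rfl (fun j hj => (hfirst j hj).ne)
  simp only [pvStep, pvMaxId arr _ hmem hub, hidx]
  -- name the pieces
  set c : Nat := (arr.getD k 0).toNat with hc
  set n : Nat := arr.length with hn
  have hmaxc : max (arr.getD k 0) 0 = (c : Int) := (Int.toNat_eq_max _).symm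
  have hq : PySem.Int.floordiv (max (arr.getD k 0) 0) ((n : Int)) = ((c / n : Nat) : Int) := by
    rw [hmaxc]; exact PySem.Int.floordiv_natCast c n
  have hr : PySem.Int.mod (max (arr.getD k 0) 0) ((n : Int)) = ((c % n : Nat) : Int) := by
    rw [hmaxc]; exact PySem.Int.mod_natCast c n
  simp only [hq, hr]
  -- B side to a pvBump fold
  rw [pvLoopB_eq_bump _ (fun i => PySem.Int.mod ((k : Int) + 1 + i) ((n : Int)))
    (fun i => PySem.Int.mod_nonneg _ (by exact_mod_cast hn0))]
  -- A side to a pvBump fold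
  rw [pvLoopA_eq_bump _ _ _ (by simpa using hn0)]
  -- normalize both index lists to (range _).map g with g t = (k + 1 + t) % n
  have hA : ((PySem.List.pyRange 1 ((arr.getD k 0) + 1) 1).map
      (fun i => (PySem.Int.mod (i + (k : Int)) (((arr.set k 0).length : Int))).toNat))
      = (List.range c).map (fun t => (k + 1 + t) % n) := by
    rw [PySem.List.pyRange_one, List.map_map]
    have hcc : ((arr.getD k 0) + 1 - 1).toNat = c := by omega
    rw [hcc]
    apply List.map_congr_left
    intro t _
    have e : (1 : Int) + (t : Int) + (k : Int) = ((k + 1 + t : Nat) : Int) := by push_cast; ring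
    simp only [Function.comp, List.length_set, ← hn, e, PySem.Int.mod_natCast, Int.toNat_natCast]
  have hB : ((PySem.List.pyRange 0 (((c % n : Nat) : Int)) 1).map
      (fun i => (PySem.Int.mod ((k : Int) + 1 + i) ((n : Int))).toNat))
      = (List.range (c % n)).map (fun t => (k + 1 + t) % n) := by
    rw [PySem.List.pyRange_one, List.map_map]
    have hcc : (((c % n : Nat) : Int) - 0).toNat = c % n := by omega
    rw [hcc]
    apply List.map_congr_left
    intro t _
    have e : (k : Int) + 1 + ((0 : Int) + (t : Int)) = ((k + 1 + t : Nat) : Int) := by push_cast; ring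
    simp only [Function.comp, e, PySem.Int.mod_natCast, Int.toNat_natCast]
  have hkk : ((k : Int)).toNat = k := Int.toNat_natCast k
  rw [hkk, hA, hB]
  -- compare element by element
  have hlenA : (((List.range c).map (fun t => (k + 1 + t) % n)).foldl pvBump (arr.set k 0)).length = n := by
    rw [pvBump_fold_length, List.length_set, hn]
  have hlenB : (((List.range (c % n)).map (fun t => (k + 1 + t) % n)).foldl pvBump
      ((arr.map (fun x => x + ((c / n : Nat) : Int))).set k (((c / n : Nat) : Int)))).length = n := by
    rw [pvBump_fold_length, List.length_set, List.length_map, hn]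
  apply List.ext_getElem (by rw [hlenA, hlenB])
  intro j hjA hjB
  have hj : j < n := by rwa [hlenA] at hjA
  have hbaseA : j < (arr.set k 0).length := by simpa [hn] using hj
  have hbaseB : j < ((arr.map (fun x => x + ((c / n : Nat) : Int))).set k (((c / n : Nat) : Int))).length := by
    simpa [hn] using hj
  rw [← List.getD_eq_getElem _ 0 hjA, ← List.getD_eq_getElem _ 0 hjB,
    pvBump_fold_getD _ _ _ hbaseA, pvBump_fold_getD _ _ _ hbaseB]
  -- counts
  have hcount : ∀ m : Nat, ((List.range m).map (fun t => (k + 1 + t) % n)).count j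
      = (List.range m).countP (fun t => (k + 1 + t) % n == j) := by
    intro m
    rw [List.count_eq_countP, List.countP_map]
    rfl
  have hsplit : (List.range c).countP (fun t => (k + 1 + t) % n == j)
      = c / n + (List.range (c % n)).countP (fun t => (k + 1 + t) % n == j) := by
    have hcc : c = (c / n) * n + c % n := by
      rw [Nat.mul_comm]; exact (Nat.div_add_mod c n).symm
    calc (List.range c).countP (fun t => (k + 1 + t) % n == j)
        = (List.range ((c / n) * n + c % n)).countP (fun t => (k + 1 + t) % n == j) := by rw [← hcc]
      _ = c / n + (List.range (c % n)).countP (fun t => (k + 1 + t) % n == j) :=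
          pvCount_range_mul_add n (k + 1) j (c / n) (c % n) (by omega) hj
  rw [hcount, hcount, hsplit]
  -- base values
  by_cases hjk : j = k
  · subst hjk
    rw [List.getD_eq_getElem _ 0 hbaseA, List.getD_eq_getElem _ 0 hbaseB,
      List.getElem_set_self (by omega), List.getElem_set_self (by omega)]
    push_cast
    ring
  · rw [List.getD_eq_getElem _ 0 hbaseA, List.getD_eq_getElem _ 0 hbaseB,
      List.getElem_set_ne (by omega) (by omega), List.getElem_set_ne (by omega) (by omega),
      List.getElem_map]
    push_cast
    ring

theorem pvStep_length (arr : List Int) : (pvStep arr).length = arr.length := by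
  rw [pvStep]
  cases hmx : PySem.List.max? arr (fun x => x) with
  | none => rfl
  | some m =>
    cases hidx : PySem.List.index? arr m with
    | none =>
      have hidx' : List.idxOf? m arr = none := by simpa [PySem.List.index?] using hidx
      simp [hidx']
    | some mi =>
      have hidx' : List.idxOf? m arr = some mi := by simpa [PySem.List.index?] using hidx
      have hne : arr ≠ [] := by
        intro e
        subst e
        simp [PySem.List.max?] at hmx
      have hn0 : (0 : Int) < ((arr.length : Int)) := by
        have := List.length_pos_iff.mpr hne
        exact_mod_cast this
      simp only [hidx]
      rw [pvLoopB_eq_bump _ (fun i => PySem.Int.mod ((mi : Int) + 1 + i) ((arr.length : Int)))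
        (fun i => PySem.Int.mod_nonneg _ hn0)]
      rw [pvBump_fold_length, List.length_set, List.length_map]

theorem pvLockstep (fuel : Nat) : ∀ (seen : PySem.Set (List Int)) (arr : List Int),
    arr ≠ [] →
    steps_to_infinite_loop_go fuel seen (PySem.Set.len seen) arr
      = steps_to_infinite_loop_alt_go fuel seen arr := by
  induction fuel with
  | zero => intro seen arr _; rfl
  | succ fuel ih =>
    intro seen arr hne
    rw [steps_to_infinite_loop_go, steps_to_infinite_loop_alt_go]
    by_cases hc : PySem.Set.contains seen arr
    · rw [if_pos hc, if_pos hc]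
    · rw [if_neg hc, if_neg hc]
      obtain ⟨k, hk, hmax, _⟩ := pvMaxEnum_char arr hne
      simp only [hmax]
      rw [pvStep_eq arr hne _ _ hmax]
      have hnotmem : arr ∉ seen := by
        intro hmem
        exact hc ((PySem.Set.contains_iff _ _).mpr hmem)
      have hlen : PySem.Set.len seen + 1 = PySem.Set.len (PySem.Set.add seen arr) := by
        rw [PySem.Set.add_of_not_mem hnotmem]
        simp [PySem.Set.len]
      rw [hlen]
      apply ih
      intro e
      have := pvStep_length arr
      rw [e] at this
      simp at this
      exact hne (List.length_eq_zero_iff.mp this.symm)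

-- ===== VERDICT (by name: the statement is the Claim_ definition above) =====
theorem steps_to_infinite_loop_spec : Claim_equal_steps_to_infinite_loop := by
  intro array _ hpre
  unfold Spec_steps_to_infinite_loop steps_to_infinite_loop steps_to_infinite_loop_alt
  have := pvLockstep 4611686018427387904 PySem.Set.empty array hpre
  simpa [PySem.Set.len, PySem.Set.empty] using this
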